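-- pv_equiv track=rewrite | github.com/unmasked213/ha-config | tmp/action_extraction_pipeline.py | build_ledger_lookup
-- ===== SOURCE A (Python) =====
-- def parse_metadata(description):
--     """Parse key:value pairs from a description field.
--
--     Returns {"_fields": {...}, "_progressions": [...]}.
--     Only lines before the first --- separator are parsed into _fields.
--     Lines after --- separators are collected as raw progression blocks.
--     """
--     if not description:
--         return {"_fields": {}, "_progressions": []}
--
--     result = {"_fields": {}, "_progressions": []}
--     current_block = []
--     past_first_separator = False
--
--     for line in description.split("\n"):
--         stripped = line.strip()
--
--         if stripped == "---":
--             if current_block: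
--                 result["_progressions"].append("\n".join(current_block))
--                 current_block = []
--             past_first_separator = True
--             continue
--
--         if ": " in stripped and not past_first_separator:
--             key, value = stripped.split(": ", 1)
--             key = key.strip().lower().replace(" ", "_")
--             result["_fields"][key] = value.strip()
--
--         if stripped:
--             current_block.append(stripped)
--
--     if current_block:
--         result["_progressions"].append("\n".join(current_block))
--
--     return result
--
-- def build_ledger_lookup(ledger_items, now):
--     """Build lookup sets from ledger items.
--
--     Returns (complete_set, failed_set, processing_dict).
--     processing_dict maps UID -> started_at string.
--     """
--     complete = set()
--     failed = set()
--     processing = {}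
--
--     for item in ledger_items:
--         uid = item["summary"]  # ledger item summary = source summary UID
--         meta = parse_metadata(item.get("description", ""))
--         status = meta["_fields"].get("status", "")
--
--         if status == "complete":
--             complete.add(uid)
--         elif status == "failed":
--             failed.add(uid)
--         elif status == "processing":
--             processing[uid] = meta["_fields"].get("started_at", "")
--
--     return complete, failed, processing
-- ===== SOURCE B (Python) =====
-- def _header(description):
--     """Stripped lines of description up to (excluding) the first '---' line."""
--     header = []
--     for line in description.split("\n"):
--         s = line.strip()
--         if s == "---":
--             break
--         header.append(s)
--     return header
--
--
-- def _field(description, key):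
--     """Value of the last header line whose normalized key equals `key`, or ''.
--
--     Scans the header backwards and returns at the first match, so no field
--     dict or pair list is ever built.
--     """
--     for s in reversed(_header(description)):
--         if ": " in s:
--             k, v = s.split(": ", 1)
--             if k.strip().lower().replace(" ", "_") == key:
--                 return v.strip()
--     return ""
--
--
-- def _status(item):
--     return _field(item.get("description", ""), "status")
--
--
-- def build_ledger_lookup(ledger_items, now):
--     """Build lookup sets from ledger items: one tagging pass, then three
--     declarative grouping passes, instead of one accumulating loop."""
--     tagged = [(it["summary"], _status(it), it.get("description", ""))
--               for it in ledger_items]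
--     complete = {uid for uid, st, _ in tagged if st == "complete"}
--     failed = {uid for uid, st, _ in tagged if st == "failed"}
--     processing = {uid: _field(desc, "started_at")
--                   for uid, st, desc in tagged if st == "processing"}
--     return complete, failed, processing
-- ===== Notes on version B (the rewrite author's own statement) =====
-- stated objective: alternative
-- what changed: B replaces A's single accumulating loop over a general parse_metadata call (fields dict plus unused progression blocks) with three declarative comprehension passes, one per status category, each reading the needed field by a backward early-return scan of the header lines with no dict or pair list built.
import Mathlib
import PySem

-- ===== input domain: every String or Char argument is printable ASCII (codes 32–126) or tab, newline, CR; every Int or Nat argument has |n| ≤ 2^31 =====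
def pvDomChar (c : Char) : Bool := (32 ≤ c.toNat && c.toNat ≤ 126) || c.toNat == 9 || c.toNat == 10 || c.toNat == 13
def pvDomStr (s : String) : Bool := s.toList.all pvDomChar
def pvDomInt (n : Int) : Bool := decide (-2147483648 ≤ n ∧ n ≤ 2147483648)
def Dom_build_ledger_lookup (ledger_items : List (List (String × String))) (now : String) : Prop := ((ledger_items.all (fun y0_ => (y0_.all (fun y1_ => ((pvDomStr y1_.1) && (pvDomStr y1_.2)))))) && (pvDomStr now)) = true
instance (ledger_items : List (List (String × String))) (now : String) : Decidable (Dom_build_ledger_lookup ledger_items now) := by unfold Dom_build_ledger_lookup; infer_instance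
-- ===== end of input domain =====

-- B replaces A's single accumulating loop over a general parse_metadata call (fields
-- dict + unused progression blocks) by one tagging pass and three declarative
-- grouping passes, one per status category, each reading a field by a backward early-return scan of the header lines;
-- objective: alternative decomposition, same asymptotic cost.

-- shared accessor: Python's item["summary"] / item.get(k, d) on the input association list
-- (first match, per the type convention for dict parameters)
def pyDictGet (d : List (String × String)) (k : String) : Option String :=
  (d.find? (fun p => p.1 == k)).map (·.2)

-- ===== PORT A =====
-- state: (fields, progressions, current_block, past_first_separator)
def aStep : (PySem.Dict String String × List String × List String × Bool) → String →
    PySem.Dict String String × List String × List String × Bool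
  | (fields, progs, cb, past), line =>
  let stripped := PySem.Str.strip line
  if stripped == "---" then
    (fields, (if cb ≠ [] then progs ++ [PySem.Str.join "\n" cb] else progs), [], true)
  else
    let fields' :=
      if PySem.Str.isIn ": " stripped && !past then
        match PySem.Str.splitMax? stripped ": " 1 with
        | some [k, v] =>
            fields.insert (PySem.Str.replace (PySem.Str.lower (PySem.Str.strip k)) " " "_")
              (PySem.Str.strip v)
        | _ => fields
      else fields
    let cb' := if stripped ≠ "" then cb ++ [stripped] else cb
    (fields', progs, cb', past)

def parse_metadata (description : String) : PySem.Dict String String × List String :=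
  if description == "" then (PySem.Dict.empty, [])
  else
    let st := ((PySem.Str.split? description "\n").getD []).foldl aStep
      (PySem.Dict.empty, [], [], false)
    (st.1, if st.2.2.1 ≠ [] then st.2.1 ++ [PySem.Str.join "\n" st.2.2.1] else st.2.1)

def aOut : (PySem.Set String × PySem.Set String × PySem.Dict String String) →
    List (String × String) → PySem.Set String × PySem.Set String × PySem.Dict String String
  | (complete, failed, processing), item =>
  let uid := (pyDictGet item "summary").getD ""
  let m := parse_metadata ((pyDictGet item "description").getD "")
  let status := m.1.getD "status" ""
  if status == "complete" then (PySem.Set.add complete uid, failed, processing)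
  else if status == "failed" then (complete, PySem.Set.add failed uid, processing)
  else if status == "processing" then
    (complete, failed, processing.insert uid (m.1.getD "started_at" ""))
  else (complete, failed, processing)

def build_ledger_lookup (ledger_items : List (List (String × String))) (now : String) :
    List String × List String × (List (String × String)) :=
  let st := ledger_items.foldl aOut (PySem.Set.empty, PySem.Set.empty, PySem.Dict.empty)
  (st.1, st.2.1, st.2.2.items)

-- ===== PORT B =====
-- _header: stripped lines up to (excluding) the first '---' line
def headerOf : List String → List String
  | [] => []
  | l :: ls =>
    let s := PySem.Str.strip l
    if s == "---" then [] else s :: headerOf ls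

-- the backward for-loop of _field with its early return (applied to the reversed header)
def fieldScan (key : String) : List String → String
  | [] => ""
  | s :: rest =>
    if PySem.Str.isIn ": " s then
      match PySem.Str.splitMax? s ": " 1 with
      | some [k, v] =>
          if (PySem.Str.replace (PySem.Str.lower (PySem.Str.strip k)) " " "_") == key
          then PySem.Str.strip v else fieldScan key rest
      | _ => fieldScan key rest
    else fieldScan key rest

def fieldOf (description key : String) : String :=
  fieldScan key (headerOf ((PySem.Str.split? description "\n").getD [])).reverse

def statusOf (it : List (String × String)) : String :=
  fieldOf ((pyDictGet it "description").getD "") "status"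

def build_ledger_lookup_alt (ledger_items : List (List (String × String))) (now : String) :
    List String × List String × (List (String × String)) :=
  let tagged := ledger_items.map (fun it =>
    ((pyDictGet it "summary").getD "", statusOf it, (pyDictGet it "description").getD ""))
  (PySem.Set.ofList ((tagged.filter (fun t => t.2.1 == "complete")).map (·.1)),
   PySem.Set.ofList ((tagged.filter (fun t => t.2.1 == "failed")).map (·.1)),
   (((tagged.filter (fun t => t.2.1 == "processing")).map
      (fun t => (t.1, fieldOf t.2.2 "started_at"))).foldl
      (fun d p => d.insert p.1 p.2) PySem.Dict.empty).items)

-- ===== PRECONDITION & SPEC =====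
-- Pre_ excludes items without a "summary" key, on which item["summary"] raises KeyError
-- in A (and in B within the matching comprehension); nothing else is excluded.
def Pre_build_ledger_lookup (ledger_items : List (List (String × String))) (now : String) : Prop :=
  ∀ it ∈ ledger_items, it.any (fun p => p.1 == "summary") = true

instance (ledger_items : List (List (String × String))) (now : String) :
    Decidable (Pre_build_ledger_lookup ledger_items now) := by
  unfold Pre_build_ledger_lookup; infer_instance

def pvWitness_build_ledger_lookup : (List (List (String × String))) × String :=
  ([[("summary", "uid-1"), ("description", "status: complete")],
    [("summary", "uid-2"), ("description", "Status: processing\nStarted at: 10:00\n---\nnote")]],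
   "now")

def Spec_build_ledger_lookup (ledger_items : List (List (String × String))) (now : String)
    (out : List String × List String × (List (String × String))) : Prop :=
  out = build_ledger_lookup_alt ledger_items now

instance (ledger_items : List (List (String × String))) (now : String)
    (out : List String × List String × (List (String × String))) :
    Decidable (Spec_build_ledger_lookup ledger_items now out) := by
  unfold Spec_build_ledger_lookup; infer_instance

-- ===== CLAIM (what is proved, stated in full; the proofs are below) =====
def Claim_equal_build_ledger_lookup : Prop :=
  ∀ (ledger_items : List (List (String × String))) (now : String),
    Dom_build_ledger_lookup ledger_items now →
    Pre_build_ledger_lookup ledger_items now →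
    Spec_build_ledger_lookup ledger_items now (build_ledger_lookup ledger_items now)

-- ===== LEMMAS AND PROOFS =====

-- proof-side helper: the key/value pairs A collects before the first '---'
def lineKV (s : String) : Option (String × String) :=
  if PySem.Str.isIn ": " s then
    match PySem.Str.splitMax? s ": " 1 with
    | some [k, v] =>
        some (PySem.Str.replace (PySem.Str.lower (PySem.Str.strip k)) " " "_",
              PySem.Str.strip v)
    | _ => none
  else none

-- once past the first separator, A never touches the fields dict again
lemma aStep_fields_past (lines : List String) (f : PySem.Dict String String)
    (progs cb : List String) :
    (lines.foldl aStep (f, progs, cb, true)).1 = f := by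
  induction lines generalizing progs cb with
  | nil => rfl
  | cons l ls ih =>
      simp only [List.foldl_cons, aStep, Bool.not_true, Bool.and_false, Bool.false_eq_true,
        if_false]
      by_cases hsep : (PySem.Str.strip l == "---") = true
      · rw [if_pos hsep]; exact ih _ _
      · rw [if_neg hsep]; exact ih _ _

-- A's fields dict = fold of the header's key/value pairs
lemma aStep_fields (lines : List String) (f : PySem.Dict String String)
    (progs cb : List String) :
    (lines.foldl aStep (f, progs, cb, false)).1 =
      ((headerOf lines).filterMap lineKV).foldl (fun d p => d.insert p.1 p.2) f := by
  induction lines generalizing f progs cb with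
  | nil => rfl
  | cons l ls ih =>
      simp only [List.foldl_cons, aStep, headerOf, Bool.not_false, Bool.and_true]
      by_cases hsep : (PySem.Str.strip l == "---") = true
      · rw [if_pos hsep, if_pos hsep]
        exact aStep_fields_past ls f _ []
      · rw [if_neg hsep, if_neg hsep]
        simp only [List.filterMap_cons, lineKV]
        by_cases hin : PySem.Str.isIn ": " (PySem.Str.strip l) = true
        · rw [if_pos hin, if_pos hin]
          cases hsp : PySem.Str.splitMax? (PySem.Str.strip l) ": " 1 with
          | none => simpa using ih _ _ _
          | some parts =>
              match parts with
              | [] => simpa using ih _ _ _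
              | [k] => simpa using ih _ _ _
              | [k, v] => simpa using ih _ _ _
              | k :: v :: w :: rest => simpa using ih _ _ _
        · rw [if_neg hin, if_neg hin]
          simpa using ih _ _ _

-- looking up in a dict built by repeated insert = last matching pair in the list
lemma get?_foldl_insert (pairs : List (String × String)) (d : PySem.Dict String String)
    (k : String) :
    (pairs.foldl (fun d p => d.insert p.1 p.2) d).get? k =
      ((pairs.reverse.find? (fun p => p.1 == k)).map (·.2)).or (d.get? k) := by
  induction pairs generalizing d with
  | nil => simp
  | cons p ps ih =>
      simp only [List.foldl_cons, List.reverse_cons, List.find?_append, Option.map_or,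
        Option.or_assoc, ih]
      by_cases h : p.1 = k
      · have hb : (p.1 == k) = true := by simpa using h
        simp [List.find?, h, PySem.Dict.get?_insert_self]
      · have hb : (p.1 == k) = false := by simpa using h
        have hk : ¬ k = p.1 := fun e => h e.symm
        simp [List.find?, hb, PySem.Dict.get?_insert, hk]

-- the backward early-return scan = first lineKV match in the scanned list
lemma fieldScan_eq (key : String) (L : List String) :
    fieldScan key L =
      (((L.filterMap lineKV).find? (fun p => p.1 == key)).map (·.2)).getD "" := by
  induction L with
  | nil => rfl
  | cons s rest ih =>
      by_cases hin : PySem.Str.isIn ": " s = true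
      · have hinC : PySem.Chars.isIn [':', ' '] s.toList = true := by simpa using hin
        cases hsp : PySem.Str.splitMax? s ": " 1 with
        | none =>
            have hkv : lineKV s = none := by simp [lineKV, hinC, hsp]
            have hfs : fieldScan key (s :: rest) = fieldScan key rest := by
              simp [fieldScan, hinC, hsp]
            rw [hfs, List.filterMap_cons, hkv, ih]
        | some parts =>
            match parts with
            | [] =>
                have hkv : lineKV s = none := by simp [lineKV, hinC, hsp]
                have hfs : fieldScan key (s :: rest) = fieldScan key rest := by
                  simp [fieldScan, hinC, hsp]
                rw [hfs, List.filterMap_cons, hkv, ih]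
            | [k] =>
                have hkv : lineKV s = none := by simp [lineKV, hinC, hsp]
                have hfs : fieldScan key (s :: rest) = fieldScan key rest := by
                  simp [fieldScan, hinC, hsp]
                rw [hfs, List.filterMap_cons, hkv, ih]
            | [k, v] =>
                have hkv : lineKV s =
                    some (PySem.Str.replace (PySem.Str.lower (PySem.Str.strip k)) " " "_",
                          PySem.Str.strip v) := by simp [lineKV, hinC, hsp]
                by_cases hk :
                    (PySem.Str.replace (PySem.Str.lower (PySem.Str.strip k)) " " "_" == key)
                      = true
                · have hfs : fieldScan key (s :: rest) = PySem.Str.strip v := by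
                    simp [fieldScan, hinC, hsp, hk]
                  rw [hfs, List.filterMap_cons, hkv]
                  simp [List.find?_cons, hk]
                · have hfs : fieldScan key (s :: rest) = fieldScan key rest := by
                    simp [fieldScan, hinC, hsp, hk]
                  rw [hfs, List.filterMap_cons, hkv]
                  simp [List.find?_cons, hk, ih]
            | k :: v :: w :: rest' =>
                have hkv : lineKV s = none := by simp [lineKV, hinC, hsp]
                have hfs : fieldScan key (s :: rest) = fieldScan key rest := by
                  simp [fieldScan, hinC, hsp]
                rw [hfs, List.filterMap_cons, hkv, ih]
      · have hinC : PySem.Chars.isIn [':', ' '] s.toList = false := by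
          simpa using hin
        have hkv : lineKV s = none := by simp [lineKV, hinC]
        have hfs : fieldScan key (s :: rest) = fieldScan key rest := by
          simp [fieldScan, hinC]
        rw [hfs, List.filterMap_cons, hkv, ih]

-- the only fact about parse_metadata the aggregation uses, in B's terms
lemma meta_getD (desc k : String) :
    (parse_metadata desc).1.getD k "" = fieldOf desc k := by
  by_cases h : desc = ""
  · subst h
    have h1 : (headerOf ((PySem.Str.split? "" "\n").getD [])).reverse = [""] := by decide
    have hf : fieldOf "" k = "" := by
      rw [fieldOf, h1]
      have hs : fieldScan k [""] = fieldScan k [] := by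
        simp [fieldScan, show PySem.Chars.isIn [':', ' '] ([] : List Char) = false from by decide]
      rw [hs]
      rfl
    simp [parse_metadata, hf]
  · have h' : (desc == "") = false := by simp [h]
    simp only [parse_metadata, h', Bool.false_eq_true, if_false, fieldOf]
    rw [PySem.Dict.getD_eq_get?_getD, aStep_fields, get?_foldl_insert, fieldScan_eq,
      List.filterMap_reverse]
    simp [PySem.Dict.get?_empty]

-- A's single fold = three filtered passes (with general accumulators)
lemma foldl_aOut (xs : List (List (String × String)))
    (c f : PySem.Set String) (p : PySem.Dict String String) :
    xs.foldl aOut (c, f, p) =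
      (((xs.filter (fun it => statusOf it == "complete")).map
          (fun it => (pyDictGet it "summary").getD "")).foldl PySem.Set.add c,
       ((xs.filter (fun it => statusOf it == "failed")).map
          (fun it => (pyDictGet it "summary").getD "")).foldl PySem.Set.add f,
       ((xs.filter (fun it => statusOf it == "processing")).map
          (fun it => ((pyDictGet it "summary").getD "",
                      fieldOf ((pyDictGet it "description").getD "") "started_at"))).foldl
          (fun d q => d.insert q.1 q.2) p) := by
  induction xs generalizing c f p with
  | nil => rfl
  | cons x rest ih =>
      have hst : (parse_metadata ((pyDictGet x "description").getD "")).1.getD "status" ""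
          = statusOf x := meta_getD _ _
      have hsa : (parse_metadata ((pyDictGet x "description").getD "")).1.getD "started_at" ""
          = fieldOf ((pyDictGet x "description").getD "") "started_at" := meta_getD _ _
      simp only [List.foldl_cons, aOut, hst, hsa, List.filter_cons]
      by_cases h1 : (statusOf x == "complete") = true
      · have h2 : (statusOf x == "failed") = false := by
          rcases eq_or_ne (statusOf x) "failed" with he | he
        <;> simp_all
        have h3 : (statusOf x == "processing") = false := by
          rcases eq_or_ne (statusOf x) "processing" with he | he <;> simp_all
        simp [h1, h2, h3, ih]
      · by_cases h2 : (statusOf x == "failed") = true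
        · have h3 : (statusOf x == "processing") = false := by
            rcases eq_or_ne (statusOf x) "processing" with he | he <;> simp_all
          simp [h1, h2, h3, ih]
        · by_cases h3 : (statusOf x == "processing") = true
          · simp [h1, h2, h3, ih]
          · simp [h1, h2, h3, ih]

theorem build_ledger_lookup_eq (ledger_items : List (List (String × String))) (now : String) :
    build_ledger_lookup ledger_items now = build_ledger_lookup_alt ledger_items now := by
  simp only [build_ledger_lookup, build_ledger_lookup_alt, foldl_aOut,
    PySem.Set.ofList_eq_foldl, PySem.Set.empty, PySem.Dict.empty,
    List.filter_map, List.map_map, Function.comp_def]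

-- ===== VERDICT (by name: the statement is the Claim_ definition above) =====
theorem build_ledger_lookup_spec : Claim_equal_build_ledger_lookup := by
  intro ledger_items now _ _
  unfold Spec_build_ledger_lookup
  exact build_ledger_lookup_eq ledger_items now
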